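-- pv_equiv track=rewrite | github.com/JeanLouisParent/Nasa-Transcript-Processor | src/processors/layout_detector.py | _cluster_rows
-- ===== SOURCE A (Python) =====
-- def _cluster_rows(regions: list) -> list:
--     if not regions: return []
--     rows = []
--     current_row = [regions[0]]
--     for next_reg in regions[1:]:
--         if next_reg[1] < (current_row[-1][1] + current_row[-1][3] + 15):
--             current_row.append(next_reg)
--         else:
--             rows.append(current_row)
--             current_row = [next_reg]
--     rows.append(current_row)
--     return rows
-- ===== SOURCE B (Python) =====
-- def _cluster_rows(regions: list) -> list:
--     # Back-to-front pass: walk the regions in reverse, prepending each region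
--     # either onto the first (topmost) row built so far or as a new row.
--     rows = []
--     for r in reversed(regions):
--         if rows and rows[0][0][1] < r[1] + r[3] + 15:
--             rows[0].insert(0, r)
--         else:
--             rows.insert(0, [r])
--     return rows
-- ===== Notes on version B (the rewrite author's own statement) =====
-- stated objective: alternative
-- what changed: Replaces the forward loop with a stateful current-row accumulator by a single back-to-front pass that prepends each region onto the topmost row built so far (or starts a new row), exploiting that the break test only compares adjacent regions.
import Mathlib
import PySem

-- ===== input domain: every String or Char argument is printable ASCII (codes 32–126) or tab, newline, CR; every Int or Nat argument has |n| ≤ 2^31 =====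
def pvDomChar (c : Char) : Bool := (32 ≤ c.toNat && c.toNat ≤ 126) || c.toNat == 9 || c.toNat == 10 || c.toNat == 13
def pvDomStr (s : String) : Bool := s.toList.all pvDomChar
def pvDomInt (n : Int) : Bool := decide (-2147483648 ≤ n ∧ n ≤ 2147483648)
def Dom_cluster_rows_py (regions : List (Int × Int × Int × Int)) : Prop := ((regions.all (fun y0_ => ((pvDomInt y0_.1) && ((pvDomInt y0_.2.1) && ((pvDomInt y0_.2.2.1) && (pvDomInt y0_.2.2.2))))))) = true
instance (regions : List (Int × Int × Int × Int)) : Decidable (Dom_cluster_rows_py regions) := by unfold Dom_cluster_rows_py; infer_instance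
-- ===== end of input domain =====

-- B clusters by one back-to-front pass prepending onto the topmost row; alternative decomposition, same cost.

-- ===== PORT A =====
-- A's loop over regions[1:] with state (rows, current_row); current_row[-1] is
-- List.getLast! — exact, since current_row is nonempty at every iteration.
def clusterLoopA (rows : List (List (Int × Int × Int × Int)))
    (cur : List (Int × Int × Int × Int)) :
    List (Int × Int × Int × Int) → List (List (Int × Int × Int × Int))
  | [] => rows ++ [cur]
  | next :: rest =>
    if next.2.1 < cur.getLast!.2.1 + cur.getLast!.2.2.2 + 15 then
      clusterLoopA rows (cur ++ [next]) rest
    else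
      clusterLoopA (rows ++ [cur]) [next] rest

def cluster_rows_py (regions : List (Int × Int × Int × Int)) : List (List (Int × Int × Int × Int)) :=
  match regions with
  | [] => []
  | r0 :: rest => clusterLoopA [] [r0] rest

-- ===== PORT B =====
-- one step of B's reversed loop: prepend r onto the topmost row, or open a new row
def altStep (r : Int × Int × Int × Int) (rows : List (List (Int × Int × Int × Int))) :
    List (List (Int × Int × Int × Int)) :=
  match rows with
  | (x :: xs) :: rest =>
    if x.2.1 < r.2.1 + r.2.2.2 + 15 then (r :: x :: xs) :: rest
    else [r] :: (x :: xs) :: rest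
  | _ => [r] :: rows

def cluster_rows_py_alt (regions : List (Int × Int × Int × Int)) : List (List (Int × Int × Int × Int)) :=
  regions.foldr altStep []

-- ===== PRECONDITION & SPEC =====
def Spec_cluster_rows_py (regions : List (Int × Int × Int × Int)) (out : List (List (Int × Int × Int × Int))) : Prop := out = cluster_rows_py_alt regions
instance (regions : List (Int × Int × Int × Int)) (out : List (List (Int × Int × Int × Int))) : Decidable (Spec_cluster_rows_py regions out) := by unfold Spec_cluster_rows_py; infer_instance

-- ===== CLAIM (what is proved, stated in full; the proofs are below) =====
def Claim_equal_cluster_rows_py : Prop := ∀ (regions : List (Int × Int × Int × Int)), Dom_cluster_rows_py regions → Spec_cluster_rows_py regions (cluster_rows_py regions)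

-- ===== LEMMAS AND PROOFS =====

-- proof-only characterisation: given the previous region p, buildT p xs returns
-- (the rest of the row p sits in, the completed rows after it)
def buildT (p : Int × Int × Int × Int) :
    List (Int × Int × Int × Int) → List (Int × Int × Int × Int) × List (List (Int × Int × Int × Int))
  | [] => ([], [])
  | x :: xs =>
    let t := buildT x xs
    if x.2.1 < p.2.1 + p.2.2.2 + 15 then (x :: t.1, t.2)
    else ([], (x :: t.1) :: t.2)

theorem alt_eq_buildT (xs : List (Int × Int × Int × Int)) (p : Int × Int × Int × Int) :
    List.foldr altStep [] (p :: xs) = (p :: (buildT p xs).1) :: (buildT p xs).2 := by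
  induction xs generalizing p with
  | nil => simp [altStep, buildT]
  | cons x xs ih =>
    show altStep p (List.foldr altStep [] (x :: xs)) = _
    rw [ih x]
    simp only [altStep, buildT]
    split_ifs <;> rfl

theorem loopA_eq_buildT (xs : List (Int × Int × Int × Int))
    (rows : List (List (Int × Int × Int × Int))) (cur : List (Int × Int × Int × Int))
    (p : Int × Int × Int × Int) (h : cur.getLast? = some p) :
    clusterLoopA rows cur xs = rows ++ (cur ++ (buildT p xs).1) :: (buildT p xs).2 := by
  induction xs generalizing rows cur p with
  | nil => simp [clusterLoopA, buildT]
  | cons x xs ih =>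
    have hlast : cur.getLast! = p := by
      simp [List.getLast!_eq_getLast?_getD, h]
    simp only [clusterLoopA, hlast, buildT]
    split_ifs with hc
    · rw [ih rows (cur ++ [x]) x (by simp)]
      simp
    · rw [ih (rows ++ [cur]) [x] x (by simp)]
      simp

-- ===== VERDICT (by name: the statement is the Claim_ definition above) =====
theorem cluster_rows_py_spec : Claim_equal_cluster_rows_py := by
  intro regions _
  show cluster_rows_py regions = cluster_rows_py_alt regions
  cases regions with
  | nil => rfl
  | cons p xs =>
    show clusterLoopA [] [p] xs = List.foldr altStep [] (p :: xs)
    rw [alt_eq_buildT, loopA_eq_buildT xs [] [p] p (by simp)]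
    simp
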